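-- pv_equiv track=rewrite | github.com/alvaro-crespo/advent-of-code | 2025/day07/solution_day07.py | part_2
-- ===== SOURCE A (Python) =====
-- def part_2(raw_lines) -> int:
--     width = len(raw_lines[0])
--     start_col = next(i for i, ch in enumerate(raw_lines[0]) if ch == "S")
--     curr = [0] * width  # curr[c] = number of timelines currently at (row, c)
--     curr[start_col] = 1
--     for r in range(0, len(raw_lines) - 1):
--         next_row = raw_lines[r + 1]
--         next_counts = [0] * width
--         for c, count in enumerate(curr):
--             ch = next_row[c]
--             if ch == ".":
--                 next_counts[c] += count  # All timelines continue down
--             elif ch == "^":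
--                 # Each timeline splits into left and right
--                 if c - 1 >= 0:
--                     next_counts[c - 1] += count
--                 if c + 1 < width:
--                     next_counts[c + 1] += count
--         curr = next_counts
--     # Sum all timelines
--     paths = sum(curr)
--     return paths
-- ===== SOURCE B (Python) =====
-- def part_2(raw_lines) -> int:
--     # Reverse dynamic programming: g[c] = number of timelines that reach the
--     # bottom starting from the current row's cell c; seed the last row with 1s,
--     # sweep upwards, and read off the answer at the start column.
--     width = len(raw_lines[0])
--     start_col = next(i for i, ch in enumerate(raw_lines[0]) if ch == "S")
--     g = [1] * width
--     for next_row in reversed(raw_lines[1:]):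
--         g = [
--             g[c] if next_row[c] == "."
--             else ((g[c - 1] if c - 1 >= 0 else 0) + (g[c + 1] if c + 1 < width else 0))
--             if next_row[c] == "^"
--             else 0
--             for c in range(width)
--         ]
--     return g[start_col]
-- ===== Notes on version B (the rewrite author's own statement) =====
-- stated objective: alternative
-- what changed: A scatters timeline counts forward down the grid from 'S' and sums the last row; B runs a reverse DP that sweeps bottom-up computing, for every cell, the number of paths to the bottom, and reads off the start column.
import Mathlib
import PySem

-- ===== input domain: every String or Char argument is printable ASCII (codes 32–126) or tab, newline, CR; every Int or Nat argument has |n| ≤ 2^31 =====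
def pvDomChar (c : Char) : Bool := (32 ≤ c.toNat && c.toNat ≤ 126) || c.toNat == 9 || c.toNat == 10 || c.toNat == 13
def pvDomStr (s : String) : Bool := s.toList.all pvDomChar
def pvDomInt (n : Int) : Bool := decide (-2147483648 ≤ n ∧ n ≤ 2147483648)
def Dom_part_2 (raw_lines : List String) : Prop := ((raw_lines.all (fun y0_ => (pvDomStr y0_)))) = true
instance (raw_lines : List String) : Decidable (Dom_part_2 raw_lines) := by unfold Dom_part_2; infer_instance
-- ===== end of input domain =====

-- B replaces A's forward column DP (scattering timeline counts down from 'S') by a reverse DP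
-- that sweeps the grid bottom-up computing paths-to-bottom per cell, then reads off the start
-- column; same cost, different decomposition.

-- ===== PORT A =====
-- body of A's inner loop: 'ch = next_row[c]; if ch == "." … elif ch == "^" …' for one (c, count)
def bodyA (width : Nat) (next_row : String) (nc : List Int) (p : Int × Int) : List Int :=
  let ch := PySem.Str.pyGet? next_row p.1   -- next_row[c]; none = IndexError, excluded by Pre_
  if ch = some '.' then
    PySem.List.pySetD nc p.1 (PySem.List.pyGetD nc p.1 0 + p.2)
  else if ch = some '^' then
    let nc1 := if 0 ≤ p.1 - 1 then
        PySem.List.pySetD nc (p.1 - 1) (PySem.List.pyGetD nc (p.1 - 1) 0 + p.2) else nc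
    if p.1 + 1 < (width : Int) then
        PySem.List.pySetD nc1 (p.1 + 1) (PySem.List.pyGetD nc1 (p.1 + 1) 0 + p.2) else nc1
  else nc

-- 'next_counts = [0] * width; for c, count in enumerate(curr): …'
def stepA (width : Nat) (next_row : String) (curr : List Int) : List Int :=
  (PySem.List.enumerate curr 0).foldl (bodyA width next_row) (List.replicate width 0)

def part_2 (raw_lines : List String) : Int :=
  let row0 := (PySem.List.pyGet? raw_lines 0).getD ""   -- raw_lines[0]; none = IndexError, excluded by Pre_
  let width := row0.toList.length
  -- next(i for i, ch in enumerate(raw_lines[0]) if ch == "S"); StopIteration excluded by Pre_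
  let start_col := (PySem.List.index? row0.toList 'S').getD 0
  let curr0 := PySem.List.pySetD (List.replicate width (0 : Int)) (start_col : Int) 1
  let final := (PySem.List.pyRange 0 ((raw_lines.length : Int) - 1) 1).foldl
      (fun curr r => stepA width ((PySem.List.pyGet? raw_lines (r + 1)).getD "") curr) curr0
  final.sum

-- ===== PORT B =====
-- one upward sweep: new g from the row just below (the list comprehension in Source B);
-- c runs over range(width) so it is never negative, and the c-1 access is guarded by 1 ≤ c,
-- exactly Python's 'c - 1 >= 0' on these nonnegative c.
def stepB (width : Nat) (next_row : String) (g : List Int) : List Int :=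
  (List.range width).map (fun (c : Nat) =>
    if PySem.Str.pyGet? next_row (c : Int) = some '.' then g.getD c 0
    else if PySem.Str.pyGet? next_row (c : Int) = some '^' then
      (if 1 ≤ c then g.getD (c - 1) 0 else 0) + (if c + 1 < width then g.getD (c + 1) 0 else 0)
    else 0)

def part_2_alt (raw_lines : List String) : Int :=
  let row0 := (PySem.List.pyGet? raw_lines 0).getD ""
  let width := row0.toList.length
  let start_col := (PySem.List.index? row0.toList 'S').getD 0
  let g := (raw_lines.tail.reverse).foldl (fun g row => stepB width row g)
      (List.replicate width (1 : Int))          -- for next_row in reversed(raw_lines[1:])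
  g.getD start_col 0

-- ===== PRECONDITION & SPEC =====
-- Pre_ excludes exactly the inputs where Python A raises: the empty list (IndexError on
-- raw_lines[0]), a first row without 'S' (StopIteration), and a later row shorter than the
-- first row (IndexError on next_row[c]); Python B raises on exactly the same inputs.
def Pre_part_2 (raw_lines : List String) : Prop :=
  raw_lines ≠ [] ∧ 'S' ∈ (raw_lines.headD "").toList ∧
    ∀ row ∈ raw_lines.tail, (raw_lines.headD "").toList.length ≤ row.toList.length
instance (raw_lines : List String) : Decidable (Pre_part_2 raw_lines) := by
  unfold Pre_part_2; infer_instance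
def pvWitness_part_2 : List String := (["S^.", "^.^", "..."])
def Spec_part_2 (raw_lines : List String) (out : Int) : Prop := out = part_2_alt raw_lines
instance (raw_lines : List String) (out : Int) : Decidable (Spec_part_2 raw_lines out) := by
  unfold Spec_part_2; infer_instance

-- ===== CLAIM (what is proved, stated in full; the proofs are below) =====
def Claim_equal_part_2 : Prop := ∀ (raw_lines : List String), Dom_part_2 raw_lines →
  Pre_part_2 raw_lines → Spec_part_2 raw_lines (part_2 raw_lines)

-- ===== LEMMAS AND PROOFS =====

-- number of timelines reaching the bottom from column c when the rows below are `below`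
def gList (width : Nat) : List String → Nat → Int
  | [], _ => 1
  | row :: rest, c =>
    if PySem.Str.pyGet? row (c : Int) = some '.' then gList width rest c
    else if PySem.Str.pyGet? row (c : Int) = some '^' then
      (if 1 ≤ c then gList width rest (c - 1) else 0) +
        (if c + 1 < width then gList width rest (c + 1) else 0)
    else 0

-- weighted sum of a counts vector against g, indices starting at i
def wsum (g : Nat → Int) : Nat → List Int → Int
  | _, [] => 0
  | i, x :: xs => x * g i + wsum g (i + 1) xs

theorem wsum_one (l : List Int) : ∀ i, wsum (fun _ => 1) i l = l.sum := by
  induction l with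
  | nil => intro i; simp [wsum]
  | cons x xs ih => intro i; simp [wsum, ih]

theorem wsum_zero (n : Nat) : ∀ i g, wsum g i (List.replicate n 0) = 0 := by
  induction n with
  | zero => intro i g; simp [wsum]
  | succ n ih => intro i g; simp [List.replicate, wsum, ih]

theorem wsum_bump (g : Nat → Int) (v : Int) (l : List Int) :
    ∀ i j, j < l.length →
      wsum g i (l.set j (l.getD j 0 + v)) = wsum g i l + v * g (i + j) := by
  induction l with
  | nil => intro i j h; simp at h
  | cons x xs ih =>
      intro i j h
      cases j with
      | zero =>
          simp only [List.set_cons_zero, List.getD_cons_zero, wsum, Nat.add_zero]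
          ring
      | succ j =>
          simp only [List.set_cons_succ, List.getD_cons_succ, wsum]
          rw [ih (i + 1) j (by simpa using h)]
          have hidx : i + 1 + j = i + (j + 1) := by omega
          rw [hidx]; ring

theorem length_bodyA (width : Nat) (row : String) (nc : List Int) (p : Int × Int) :
    (bodyA width row nc p).length = nc.length := by
  unfold bodyA
  dsimp only
  split_ifs <;> simp [PySem.List.length_pySetD]

theorem length_foldA (width : Nat) (row : String) (ps : List (Int × Int)) :
    ∀ nc : List Int, (ps.foldl (bodyA width row) nc).length = nc.length := by
  induction ps with
  | nil => intro nc; rfl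
  | cons p ps ih => intro nc; rw [List.foldl_cons, ih, length_bodyA]

theorem length_stepA (width : Nat) (row : String) (curr : List Int) :
    (stepA width row curr).length = width := by
  unfold stepA
  rw [length_foldA, List.length_replicate]

-- one enumerate step preserves the weighted sum: a bump at c with weight gList below
-- costs exactly count * gList (row :: below) c
theorem bodyA_wsum (width : Nat) (row : String) (below : List String)
    (nc : List Int) (i : Nat) (x : Int) (hnc : nc.length = width) (hi : i < width) :
    wsum (fun c => gList width below c) 0 (bodyA width row nc ((i : Int), x))
      = wsum (fun c => gList width below c) 0 nc + x * gList width (row :: below) i := by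
  unfold bodyA
  dsimp only
  rw [gList]
  by_cases h1 : PySem.Str.pyGet? row (i : Int) = some '.'
  · rw [if_pos h1, if_pos h1, PySem.List.pySetD_natCast, PySem.List.pyGetD_natCast,
      wsum_bump (fun c => gList width below c) x nc 0 i (by omega)]
    simp only [Nat.zero_add]
  · rw [if_neg h1, if_neg h1]
    by_cases h2 : PySem.Str.pyGet? row (i : Int) = some '^'
    · rw [if_pos h2, if_pos h2]
      by_cases hl : 1 ≤ i
      · have e1 : (i : Int) - 1 = ((i - 1 : Nat) : Int) := by omega
        have hcond : (0 : Int) ≤ (i : Int) - 1 := by omega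
        rw [if_pos hcond, if_pos hl, e1]
        by_cases hr : i + 1 < width
        · have hcondr : (i : Int) + 1 < (width : Int) := by exact_mod_cast hr
          have e2 : (i : Int) + 1 = ((i + 1 : Nat) : Int) := by omega
          rw [if_pos hcondr, if_pos hr, e2]
          rw [PySem.List.pySetD_natCast, PySem.List.pyGetD_natCast,
            PySem.List.pySetD_natCast, PySem.List.pyGetD_natCast]
          rw [wsum_bump (fun c => gList width below c) x _ 0 (i + 1)
            (by simp [List.length_set]; omega)]
          rw [wsum_bump (fun c => gList width below c) x nc 0 (i - 1) (by omega)]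
          simp only [Nat.zero_add]; ring
        · have hcondr : ¬ ((i : Int) + 1 < (width : Int)) := by
            intro hc; exact hr (by exact_mod_cast hc)
          rw [if_neg hcondr, if_neg hr]
          rw [PySem.List.pySetD_natCast, PySem.List.pyGetD_natCast,
            wsum_bump (fun c => gList width below c) x nc 0 (i - 1) (by omega)]
          simp only [Nat.zero_add]; ring
      · have hcond : ¬ ((0 : Int) ≤ (i : Int) - 1) := by omega
        rw [if_neg hcond, if_neg hl]
        by_cases hr : i + 1 < width
        · have hcondr : (i : Int) + 1 < (width : Int) := by exact_mod_cast hr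
          have e2 : (i : Int) + 1 = ((i + 1 : Nat) : Int) := by omega
          rw [if_pos hcondr, if_pos hr, e2]
          rw [PySem.List.pySetD_natCast, PySem.List.pyGetD_natCast,
            wsum_bump (fun c => gList width below c) x nc 0 (i + 1) (by omega)]
          simp only [Nat.zero_add]; ring
        · have hcondr : ¬ ((i : Int) + 1 < (width : Int)) := by
            intro hc; exact hr (by exact_mod_cast hc)
          rw [if_neg hcondr, if_neg hr]
          ring
    · rw [if_neg h2, if_neg h2]
      ring

-- fold invariant over the enumerate loop
theorem foldA_inv (width : Nat) (row : String) (below : List String) (xs : List Int) :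
    ∀ (i : Nat) (nc : List Int), nc.length = width → i + xs.length ≤ width →
      wsum (fun c => gList width below c) 0
          ((PySem.List.enumerate xs (i : Int)).foldl (bodyA width row) nc)
        = wsum (fun c => gList width below c) 0 nc
            + wsum (fun c => gList width (row :: below) c) i xs := by
  induction xs with
  | nil => intro i nc _ _; simp [PySem.List.enumerate_nil, wsum]
  | cons x xs ih =>
      intro i nc hnc hlen
      rw [PySem.List.enumerate_cons, List.foldl_cons]
      have ecast : (i : Int) + 1 = ((i + 1 : Nat) : Int) := by omega
      rw [ecast, ih (i + 1) _ (by rw [length_bodyA]; exact hnc) (by simp at hlen ⊢; omega)]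
      rw [bodyA_wsum width row below nc i x hnc (by simp at hlen; omega)]
      simp [wsum]; ring

theorem stepA_wsum (width : Nat) (row : String) (below : List String) (curr : List Int)
    (h : curr.length = width) :
    wsum (fun c => gList width below c) 0 (stepA width row curr)
      = wsum (fun c => gList width (row :: below) c) 0 curr := by
  unfold stepA
  have hinv := foldA_inv width row below curr 0 (List.replicate width 0)
    List.length_replicate (by omega)
  simp only [Nat.cast_zero] at hinv
  rw [hinv, wsum_zero]
  ring

theorem foldA_sum (width : Nat) (below : List String) :
    ∀ curr : List Int, curr.length = width →
      (below.foldl (fun cur row => stepA width row cur) curr).sum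
        = wsum (fun c => gList width below c) 0 curr := by
  induction below with
  | nil =>
      intro curr h
      simp only [List.foldl_nil]
      rw [← wsum_one curr 0]
      rfl
  | cons row rest ih =>
      intro curr h
      rw [List.foldl_cons, ih (stepA width row curr) (length_stepA width row curr),
        stepA_wsum width row rest curr h]

theorem foldB_eq (width : Nat) (t : List String) :
    t.foldr (fun row g => stepB width row g) (List.replicate width (1 : Int))
      = (List.range width).map (fun c => gList width t c) := by
  induction t with
  | nil =>
      simp only [List.foldr_nil, gList]
      rw [List.map_const', List.length_range]
  | cons row rest ih =>
      rw [List.foldr_cons, ih]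
      unfold stepB
      apply List.map_congr_left
      intro c hc
      have hcw : c < width := List.mem_range.mp hc
      rw [gList]
      by_cases h1 : PySem.Str.pyGet? row (c : Int) = some '.'
      · rw [if_pos h1, if_pos h1, PySem.List.getD_map_range _ _ _ _ hcw]
      · rw [if_neg h1, if_neg h1]
        by_cases h2 : PySem.Str.pyGet? row (c : Int) = some '^'
        · rw [if_pos h2, if_pos h2]
          congr 1
          · by_cases hl : 1 ≤ c
            · rw [if_pos hl, if_pos hl, PySem.List.getD_map_range _ _ _ _ (by omega)]
            · rw [if_neg hl, if_neg hl]
          · by_cases hr : c + 1 < width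
            · rw [if_pos hr, if_pos hr, PySem.List.getD_map_range _ _ _ _ hr]
            · rw [if_neg hr, if_neg hr]
        · rw [if_neg h2, if_neg h2]

-- ===== VERDICT (by name: the statement is the Claim_ definition above) =====
theorem part_2_spec : Claim_equal_part_2 := by
  intro raw_lines _ hpre
  obtain ⟨hne, hS, hlen⟩ := hpre
  unfold Spec_part_2
  cases raw_lines with
  | nil => exact absurd rfl hne
  | cons h t =>
    simp only [List.headD_cons] at hS
    unfold part_2 part_2_alt
    have hrow0 : (PySem.List.pyGet? (h :: t) 0).getD "" = h := by
      rw [show (0 : Int) = ((0 : Nat) : Int) from rfl, PySem.List.pyGet?_natCast]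
      rfl
    rw [hrow0]
    dsimp only
    set width := h.toList.length with hwidth
    obtain ⟨k, hk⟩ : ∃ k, PySem.List.index? h.toList 'S' = some k := by
      have := (PySem.List.index?_isSome_iff h.toList 'S').mpr hS
      exact Option.isSome_iff_exists.mp this
    obtain ⟨hkw, -, -⟩ := PySem.List.getElem_of_index?_eq_some hk
    rw [hk]
    simp only [Option.getD_some]
    -- A's range fold = structural fold over t
    have hbound : ((h :: t).length : Int) - 1 = ((t.length : Nat) : Int) := by
      simp
    have hcongr :
        (PySem.List.pyRange 0 (((h :: t).length : Int) - 1) 1).foldl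
            (fun curr r => stepA width ((PySem.List.pyGet? (h :: t) (r + 1)).getD "") curr)
            (PySem.List.pySetD (List.replicate width (0 : Int)) (k : Int) 1)
          = t.foldl (fun cur row => stepA width row cur)
            (PySem.List.pySetD (List.replicate width (0 : Int)) (k : Int) 1) := by
      rw [hbound]
      rw [PySem.List.foldl_congr_mem _ _
        (fun curr r => stepA width (PySem.List.pyGetD t r "") curr) _ ?_]
      · have := PySem.List.foldl_pyRange_zero_pyGetD t ""
          (fun cur row => stepA width row cur)
          (PySem.List.pySetD (List.replicate width (0 : Int)) (k : Int) 1)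
        simpa [PySem.List.len] using this
      · intro acc r hr
        have hr0 : 0 ≤ r := (PySem.List.mem_pyRange_one.mp hr).1
        obtain ⟨n, rfl⟩ := Int.eq_ofNat_of_zero_le hr0
        congr 1
        rw [show (n : Int) + 1 = ((n + 1 : Nat) : Int) from by omega,
          PySem.List.pyGet?_natCast]
        simp [PySem.List.pyGetD, PySem.List.pyGet?_natCast]
    rw [hcongr]
    have hcurr0 : PySem.List.pySetD (List.replicate width (0 : Int)) (k : Int) 1
        = (List.replicate width (0 : Int)).set k ((List.replicate width (0 : Int)).getD k 0 + 1) := by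
      rw [PySem.List.pySetD_natCast, List.getD_replicate 0 hkw]
      norm_num
    rw [foldA_sum width t _ (by rw [PySem.List.length_pySetD, List.length_replicate]),
      hcurr0, wsum_bump (fun c => gList width t c) 1 _ 0 k (by simpa using hkw),
      wsum_zero]
    -- B side
    rw [show (h :: t).tail = t from rfl, List.foldl_reverse]
    have hB : t.foldr (fun x y => (fun g row => stepB width row g) y x)
        (List.replicate width (1 : Int)) = (List.range width).map (fun c => gList width t c) := by
      simpa using foldB_eq width t
    rw [hB, PySem.List.getD_map_range _ _ _ _ hkw]
    simp
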